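-- pv_equiv track=rewrite | github.com/havy79204/CapSton2_booking- | AI/src/db_pipeline.py | reshape_daily
-- ===== SOURCE A (Python) =====
-- from typing import Dict, List, Sequence
--
-- def reshape_daily(slots: Sequence[bool], hours: Sequence[int]) -> Dict[int, List[int]]:
--   hours_per_day = len(hours)
--   days = 7
--   out: Dict[int, List[int]] = {d: [] for d in range(days)}
--   for d in range(days):
--     for idx, h in enumerate(hours):
--       flat_idx = d * hours_per_day + idx
--       if flat_idx < len(slots) and slots[flat_idx]:
--         out[d].append(h)
--   return out
-- ===== SOURCE B (Python) =====
-- def reshape_daily(slots, hours):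
--   out = {d: [] for d in range(7)}
--   hours_per_day = len(hours)
--   if hours_per_day == 0:
--     return out
--   for flat_idx, active in enumerate(slots):
--     day, hi = divmod(flat_idx, hours_per_day)
--     if day < 7 and active:
--       out[day].append(hours[hi])
--   return out
-- ===== Notes on version B (the rewrite author's own statement) =====
-- stated objective: faster
-- what changed: Inverts the traversal: instead of nested day/hour loops computing flat indices d*H+idx and probing slots with a bounds test and per-key dict appends, B makes one linear pass over slots and recovers (day, hour) coordinates from the flat index with divmod, appending hours[hi] when the slot is active and day < 7 (slots past day 6 are dropped, as in A).
import Mathlib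
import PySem

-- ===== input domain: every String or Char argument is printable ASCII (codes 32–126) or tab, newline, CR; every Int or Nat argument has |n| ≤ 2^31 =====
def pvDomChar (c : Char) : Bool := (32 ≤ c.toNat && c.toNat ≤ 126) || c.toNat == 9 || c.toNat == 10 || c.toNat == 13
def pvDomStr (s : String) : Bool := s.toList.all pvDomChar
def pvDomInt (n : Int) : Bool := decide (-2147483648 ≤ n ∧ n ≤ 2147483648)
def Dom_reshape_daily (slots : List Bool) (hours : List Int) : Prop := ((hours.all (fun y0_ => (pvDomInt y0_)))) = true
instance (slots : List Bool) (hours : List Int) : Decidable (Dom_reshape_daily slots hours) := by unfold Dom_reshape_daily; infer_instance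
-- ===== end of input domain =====

-- B inverts the traversal: A's nested day/hour loops build flat indices d*H+idx and probe slots;
-- B makes one linear pass over slots, recovering (day, hour) from the flat index with divmod (objective: alternative).

-- ===== PORT A =====
-- literal transliteration of A: dict pre-seeded with keys 0..6, nested day/hour loops,
-- flat index d*hours_per_day+idx, guarded indexing (the guard makes pyGetD exact: the index
-- is nonnegative and < len(slots) whenever it is read), out[d].append(h) as Dict.modify.
def reshape_daily (slots : List Bool) (hours : List Int) : List (Int × List Int) :=
  let hours_per_day : Int := hours.length
  let out0 : PySem.Dict Int (List Int) :=
    (PySem.List.pyRange 0 7 1).foldl (fun o d => o.insert d []) PySem.Dict.empty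
  let out :=
    (PySem.List.pyRange 0 7 1).foldl (fun o d =>
      (PySem.List.enumerate hours 0).foldl (fun o p =>
        if decide (d * hours_per_day + p.1 < (slots.length : Int)) &&
            PySem.List.pyGetD slots (d * hours_per_day + p.1) false
        then o.modify d [] (fun l => l ++ [p.2])
        else o) o) out0
  out.items

-- ===== PORT B =====
-- literal transliteration of Source B: dict pre-seeded with keys 0..6; if hours_per_day == 0 return it;
-- else one pass over enumerate(slots) with day, hi = divmod(flat_idx, hours_per_day), and
-- out[day].append(hours[hi]) when day < 7 and the slot is active.  divmod is divmod?
-- (some since hours_per_day ≠ 0 on this branch; the none arm is an unreachable totality guard),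
-- and hours[hi] is pyGetD (exact: 0 ≤ hi < len(hours) always holds).
def reshape_daily_alt (slots : List Bool) (hours : List Int) : List (Int × List Int) :=
  let out0 : PySem.Dict Int (List Int) :=
    (PySem.List.pyRange 0 7 1).foldl (fun o d => o.insert d []) PySem.Dict.empty
  let hours_per_day : Int := hours.length
  if hours_per_day == 0 then out0.items else
  let out :=
    (PySem.List.enumerate slots 0).foldl (fun o p =>
      match PySem.Int.divmod? p.1 hours_per_day with
      | none => o
      | some (day, hi) =>
        if decide (day < 7) && p.2
        then o.modify day [] (fun l => l ++ [PySem.List.pyGetD hours hi 0])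
        else o) out0
  out.items

-- ===== PRECONDITION & SPEC =====
def Spec_reshape_daily (slots : List Bool) (hours : List Int) (out : List (Int × List Int)) : Prop := out = reshape_daily_alt slots hours
instance (slots : List Bool) (hours : List Int) (out : List (Int × List Int)) : Decidable (Spec_reshape_daily slots hours out) := by unfold Spec_reshape_daily; infer_instance

-- ===== CLAIM (what is proved, stated in full; the proofs are below) =====
def Claim_equal_reshape_daily : Prop := ∀ (slots : List Bool) (hours : List Int), Dom_reshape_daily slots hours → Spec_reshape_daily slots hours (reshape_daily slots hours)

-- ===== LEMMAS AND PROOFS =====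

-- the 7-entry association list both dicts boil down to
def pvSeven (v : Nat → List Int) : List (Int × List Int) :=
  [(0, v 0), (1, v 1), (2, v 2), (3, v 3), (4, v 4), (5, v 5), (6, v 6)]

-- the hours selected by A's inner loop for one day
def pvSel (cond : Int → Bool) (hs : List Int) (s : Int) : List Int :=
  (PySem.List.enumerate hs s).filterMap (fun p => if cond p.1 then some p.2 else none)

-- A's per-day selection, day taken as an Int
def pvSelA (slots : List Bool) (hours : List Int) (d : Int) : List Int :=
  pvSel (fun i => decide (d * (hours.length : Int) + i < (slots.length : Int)) &&
    PySem.List.pyGetD slots (d * (hours.length : Int) + i) false) hours 0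

-- B's per-day selection: what B's pass over the remaining slots contributes to day d
def pvSelB (hours : List Int) (d : Nat) (rest : List Bool) (j : Nat) : List Int :=
  (PySem.List.enumerate rest (j : Int)).filterMap (fun p =>
    if (PySem.Int.floordiv p.1 (hours.length : Int) == (d : Int)) && p.2
    then some (PySem.List.pyGetD hours (PySem.Int.mod p.1 (hours.length : Int)) 0) else none)

-- the chunk-of-slots characterisation both selections are proved equal to
def pvChunkSel (slots : List Bool) (hours : List Int) (dn : Nat) : List Int :=
  (hours.zip ((slots.drop (dn * hours.length)).take hours.length)).filterMap
    (fun q => if q.2 then some q.1 else none)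

-- the pre-seeded dict {0: [], ..., 6: []}
theorem pv_seed :
    (PySem.List.pyRange 0 7 1).foldl (fun (o : PySem.Dict Int (List Int)) d => o.insert d [])
      PySem.Dict.empty = PySem.Dict.mk (pvSeven (fun _ => [])) := by decide


theorem pv_find?_mid {d : Int} {v : List Int} (pre post : List (Int × List Int))
    (hpre : ∀ p ∈ pre, (p.1 == d) = false) :
    List.find? (fun p => p.1 == d) (pre ++ (d, v) :: post) = some (d, v) := by
  induction pre with
  | nil => simp
  | cons a t ih =>
      rw [List.cons_append, List.find?_cons_of_neg (by simpa using hpre a (by simp))]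
      exact ih (fun p hp => hpre p (by simp [hp]))


theorem pv_map_mid {d : Int} {v w : List Int} (pre post : List (Int × List Int))
    (hpre : ∀ p ∈ pre, (p.1 == d) = false) (hpost : ∀ p ∈ post, (p.1 == d) = false) :
    (pre ++ (d, v) :: post).map (fun p => if p.1 = d then (d, w) else p)
      = pre ++ (d, w) :: post := by
  rw [List.map_append, List.map_cons]
  congr 1
  · conv_rhs => rw [← List.map_id pre]
    exact List.map_congr_left (fun p hp => by simp [beq_eq_false_iff_ne.mp (hpre p hp)])
  · congr 1
    · rw [if_pos rfl]
    · conv_rhs => rw [← List.map_id post]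
      exact List.map_congr_left (fun p hp => by simp [beq_eq_false_iff_ne.mp (hpost p hp)])

-- A's inner loop over one day, on a dict that contains key d exactly once
theorem pv_inner (d : Int) (cond : Int → Bool) (hs : List Int) :
    ∀ (s : Int) (pre post : List (Int × List Int)) (v : List Int),
    (∀ p ∈ pre, (p.1 == d) = false) → (∀ p ∈ post, (p.1 == d) = false) →
    (PySem.List.enumerate hs s).foldl (fun o p =>
        if cond p.1 then o.modify d [] (fun l => l ++ [p.2]) else o)
        (PySem.Dict.mk (pre ++ (d, v) :: post))
      = PySem.Dict.mk (pre ++ (d, v ++ pvSel cond hs s) :: post) := by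
  induction hs with
  | nil => intro s pre post v _ _; simp [pvSel, PySem.List.enumerate_nil]
  | cons h t ih =>
      intro s pre post v hpre hpost
      rw [PySem.List.enumerate_cons]
      simp only [List.foldl_cons]
      by_cases hc : cond s
      · have hmod : (PySem.Dict.mk (pre ++ (d, v) :: post)).modify d [] (fun l => l ++ [h])
            = PySem.Dict.mk (pre ++ (d, v ++ [h]) :: post) := by
          simp only [PySem.Dict.modify, PySem.Dict.insert, PySem.Dict.getD, PySem.Dict.get?,
            PySem.Dict.contains, pv_find?_mid pre post hpre]
          simp [pv_map_mid pre post hpre hpost]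
        rw [hc, if_pos rfl, hmod, ih (s+1) pre post (v ++ [h]) hpre hpost]
        simp [pvSel, PySem.List.enumerate_cons, hc]
      · rw [if_neg (by simp [hc]), ih (s+1) pre post v hpre hpost]
        simp [pvSel, PySem.List.enumerate_cons, hc]

-- A's selection at flat offset c equals the zip-with-chunk selection
theorem pv_per (bs : List Bool) (c : Nat) (hs : List Int) :
    ∀ (s : Nat),
    pvSel (fun i => decide ((c : Int) + i - s < (bs.length : Int)) &&
        PySem.List.pyGetD bs ((c : Int) + i - s) false) hs s
      = (hs.zip ((bs.drop c).take hs.length)).filterMap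
          (fun q => if q.2 then some q.1 else none) := by
  induction hs generalizing c with
  | nil => intro s; simp [pvSel, PySem.List.enumerate_nil]
  | cons h t ih =>
      intro s
      have harith : (c : Int) + (s : Int) - (s : Int) = (c : Int) := by ring
      by_cases hm : c < bs.length
      · have hdrop : bs.drop c = bs[c] :: bs.drop (c + 1) := List.drop_eq_getElem_cons hm
        have hgetD : bs.getD c false = bs[c] := by
          simp [List.getD, List.getElem?_eq_getElem hm]
        rw [hdrop]
        simp only [pvSel, PySem.List.enumerate_cons, List.filterMap_cons]
        have hcond : (decide ((c : Int) + (s : Int) - (s : Int) < (bs.length : Int)) &&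
            PySem.List.pyGetD bs ((c : Int) + (s : Int) - (s : Int)) false) = bs[c] := by
          rw [harith]
          simp [PySem.List.pyGetD_natCast, hm]
        rw [hcond]
        have ht : pvSel (fun i => decide ((c : Int) + i - s < (bs.length : Int)) &&
              PySem.List.pyGetD bs ((c : Int) + i - s) false) t (s + 1)
            = (t.zip ((bs.drop (c + 1)).take t.length)).filterMap
                (fun q => if q.2 then some q.1 else none) := by
          have := ih (c + 1) (s + 1)
          simp only [pvSel] at this ⊢
          rw [← this]
          apply List.filterMap_congr
          intro p _
          have harith2 : ((c : Int) + 1) + p.1 - ((s : Int) + 1) = (c : Int) + p.1 - s := by ring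
          simp only [Int.natCast_add, Int.natCast_one, harith2]
        simp only [pvSel] at ht
        cases hb : bs[c]
        · simpa [hb] using ht
        · have := congrArg (fun l => h :: l) ht
          simpa [hb] using this
      · have hdrop : bs.drop c = [] := List.drop_eq_nil_iff.mpr (by omega)
        rw [hdrop]
        simp only [List.take_nil, List.zip_nil_right, List.filterMap_nil]
        have hall : ∀ (u : List Int) (s' : Nat), (s:Int) ≤ s' →
            pvSel (fun i => decide ((c : Int) + i - s < (bs.length : Int)) &&
              PySem.List.pyGetD bs ((c : Int) + i - s) false) u s' = [] := by
          intro u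
          induction u with
          | nil => intro s' _; simp [pvSel, PySem.List.enumerate_nil]
          | cons x xs ihx =>
              intro s' hs'
              simp only [pvSel, PySem.List.enumerate_cons, List.filterMap_cons]
              have hge : ¬ ((c : Int) + s' - s < (bs.length : Int)) := by
                push_cast; omega
              have := ihx (s' + 1) (by omega)
              simpa [pvSel, decide_eq_false hge] using this
        exact hall (h :: t) s le_rfl

-- A's per-day selection equals the chunk selection
theorem pv_dayA (slots : List Bool) (hours : List Int) (dn : Nat) :
    pvSelA slots hours (dn : Int) = pvChunkSel slots hours dn := by
  have h := pv_per slots (dn * hours.length) hours 0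
  unfold pvSelA pvChunkSel
  rw [← h]
  unfold pvSel
  apply List.filterMap_congr
  intro p _
  have : ((dn * hours.length : Nat) : Int) + p.1 - ((0:Nat):Int)
      = (dn : Int) * (hours.length : Int) + p.1 := by push_cast; ring
  simp only [this]

-- A's inner loop on the seven-key dict
theorem pv_inner7 (d : Int) (h0 : 0 ≤ d) (h7 : d < 7) (cond : Int → Bool) (hs : List Int)
    (v : Nat → List Int) :
    (PySem.List.enumerate hs 0).foldl (fun o p =>
        if cond p.1 then o.modify d [] (fun l => l ++ [p.2]) else o) (PySem.Dict.mk (pvSeven v))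
      = PySem.Dict.mk (pvSeven (fun e => if (e : Int) = d then v e ++ pvSel cond hs 0 else v e)) := by
  interval_cases d
  · simpa [pvSeven] using pv_inner 0 cond hs 0 [] [((1:Int), v 1), ((2:Int), v 2), ((3:Int), v 3), ((4:Int), v 4), ((5:Int), v 5), ((6:Int), v 6)] (v 0)
      (by intro p hp; fin_cases hp <;> try rfl) (by intro p hp; fin_cases hp <;> try rfl)
  · simpa [pvSeven] using pv_inner 1 cond hs 0 [((0:Int), v 0)] [((2:Int), v 2), ((3:Int), v 3), ((4:Int), v 4), ((5:Int), v 5), ((6:Int), v 6)] (v 1)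
      (by intro p hp; fin_cases hp <;> try rfl) (by intro p hp; fin_cases hp <;> try rfl)
  · simpa [pvSeven] using pv_inner 2 cond hs 0 [((0:Int), v 0), ((1:Int), v 1)] [((3:Int), v 3), ((4:Int), v 4), ((5:Int), v 5), ((6:Int), v 6)] (v 2)
      (by intro p hp; fin_cases hp <;> try rfl) (by intro p hp; fin_cases hp <;> try rfl)
  · simpa [pvSeven] using pv_inner 3 cond hs 0 [((0:Int), v 0), ((1:Int), v 1), ((2:Int), v 2)] [((4:Int), v 4), ((5:Int), v 5), ((6:Int), v 6)] (v 3)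
      (by intro p hp; fin_cases hp <;> try rfl) (by intro p hp; fin_cases hp <;> try rfl)
  · simpa [pvSeven] using pv_inner 4 cond hs 0 [((0:Int), v 0), ((1:Int), v 1), ((2:Int), v 2), ((3:Int), v 3)] [((5:Int), v 5), ((6:Int), v 6)] (v 4)
      (by intro p hp; fin_cases hp <;> try rfl) (by intro p hp; fin_cases hp <;> try rfl)
  · simpa [pvSeven] using pv_inner 5 cond hs 0 [((0:Int), v 0), ((1:Int), v 1), ((2:Int), v 2), ((3:Int), v 3), ((4:Int), v 4)] [((6:Int), v 6)] (v 5)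
      (by intro p hp; fin_cases hp <;> try rfl) (by intro p hp; fin_cases hp <;> try rfl)
  · simpa [pvSeven] using pv_inner 6 cond hs 0 [((0:Int), v 0), ((1:Int), v 1), ((2:Int), v 2), ((3:Int), v 3), ((4:Int), v 4), ((5:Int), v 5)] [] (v 6)
      (by intro p hp; fin_cases hp <;> try rfl) (by intro p hp; fin_cases hp <;> try rfl)

-- A's whole computation, as the 7-entry list of its per-day selections
theorem pv_A (slots : List Bool) (hours : List Int) :
    reshape_daily slots hours = pvSeven (fun dn => pvSelA slots hours (dn : Int)) := by
  unfold reshape_daily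
  rw [show PySem.List.pyRange 0 7 1 = ([0,1,2,3,4,5,6] : List Int) from by decide,
    show ([0,1,2,3,4,5,6] : List Int).foldl (fun (o : PySem.Dict Int (List Int)) d => o.insert d []) PySem.Dict.empty
        = PySem.Dict.mk (pvSeven (fun _ => [])) from by decide]
  simp only [List.foldl_cons, List.foldl_nil]
  rw [pv_inner7 0 (by omega) (by omega) (fun i => decide ((0:Int) * (hours.length:Int) + i < (slots.length : Int)) &&
        PySem.List.pyGetD slots ((0:Int) * (hours.length:Int) + i) false) hours _]
  rw [pv_inner7 1 (by omega) (by omega) (fun i => decide ((1:Int) * (hours.length:Int) + i < (slots.length : Int)) &&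
        PySem.List.pyGetD slots ((1:Int) * (hours.length:Int) + i) false) hours _]
  rw [pv_inner7 2 (by omega) (by omega) (fun i => decide ((2:Int) * (hours.length:Int) + i < (slots.length : Int)) &&
        PySem.List.pyGetD slots ((2:Int) * (hours.length:Int) + i) false) hours _]
  rw [pv_inner7 3 (by omega) (by omega) (fun i => decide ((3:Int) * (hours.length:Int) + i < (slots.length : Int)) &&
        PySem.List.pyGetD slots ((3:Int) * (hours.length:Int) + i) false) hours _]
  rw [pv_inner7 4 (by omega) (by omega) (fun i => decide ((4:Int) * (hours.length:Int) + i < (slots.length : Int)) &&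
        PySem.List.pyGetD slots ((4:Int) * (hours.length:Int) + i) false) hours _]
  rw [pv_inner7 5 (by omega) (by omega) (fun i => decide ((5:Int) * (hours.length:Int) + i < (slots.length : Int)) &&
        PySem.List.pyGetD slots ((5:Int) * (hours.length:Int) + i) false) hours _]
  rw [pv_inner7 6 (by omega) (by omega) (fun i => decide ((6:Int) * (hours.length:Int) + i < (slots.length : Int)) &&
        PySem.List.pyGetD slots ((6:Int) * (hours.length:Int) + i) false) hours _]
  simp [pvSeven, pvSelA, PySem.Dict.items]

-- divmod? on a nonzero divisor
theorem pv_divmod (i b : Int) (hb : b ≠ 0) :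
    PySem.Int.divmod? i b = some (PySem.Int.floordiv i b, PySem.Int.mod i b) := by
  simp [PySem.Int.divmod?, PySem.Int.floordiv, PySem.Int.mod, hb]


theorem pv_seven_congr {f g : Nat → List Int} (h : ∀ d, d < 7 → f d = g d) :
    pvSeven f = pvSeven g := by
  simp [pvSeven, h 0 (by omega), h 1 (by omega), h 2 (by omega), h 3 (by omega),
    h 4 (by omega), h 5 (by omega), h 6 (by omega)]

-- modifying one of the seven pre-seeded keys
theorem pv_modify7 (v : Nat → List Int) (day : Int) (h0 : 0 ≤ day) (h7 : day < 7)
    (g : List Int → List Int) :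
    (PySem.Dict.mk (pvSeven v)).modify day [] g
      = PySem.Dict.mk (pvSeven (fun d => if (d : Int) = day then g (v d) else v d)) := by
  interval_cases day
  · simp [pvSeven, PySem.Dict.modify, PySem.Dict.insert, PySem.Dict.getD, PySem.Dict.get?,
      PySem.Dict.contains, List.find?]
  · simp [pvSeven, PySem.Dict.modify, PySem.Dict.insert, PySem.Dict.getD, PySem.Dict.get?,
      PySem.Dict.contains, List.find?]
  · simp [pvSeven, PySem.Dict.modify, PySem.Dict.insert, PySem.Dict.getD, PySem.Dict.get?,
      PySem.Dict.contains, List.find?]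
  · simp [pvSeven, PySem.Dict.modify, PySem.Dict.insert, PySem.Dict.getD, PySem.Dict.get?,
      PySem.Dict.contains, List.find?]
  · simp [pvSeven, PySem.Dict.modify, PySem.Dict.insert, PySem.Dict.getD, PySem.Dict.get?,
      PySem.Dict.contains, List.find?]
  · simp [pvSeven, PySem.Dict.modify, PySem.Dict.insert, PySem.Dict.getD, PySem.Dict.get?,
      PySem.Dict.contains, List.find?]
  · simp [pvSeven, PySem.Dict.modify, PySem.Dict.insert, PySem.Dict.getD, PySem.Dict.get?,
      PySem.Dict.contains, List.find?]

-- one step of B's selection: the head slot either lands in day j/H or nowhere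
theorem pv_selB_cons (hours : List Int) (hH : 0 < hours.length) (d : Nat) (b : Bool)
    (t : List Bool) (j : Nat) :
    pvSelB hours d (b :: t) j
      = (if j / hours.length = d ∧ b = true
         then [PySem.List.pyGetD hours ((j % hours.length : Nat) : Int) 0] else [])
        ++ pvSelB hours d t (j + 1) := by
  have hfd : PySem.Int.floordiv (j : Int) (hours.length : Int)
      = ((j / hours.length : Nat) : Int) := by simp
  have hmd : PySem.Int.mod (j : Int) (hours.length : Int)
      = ((j % hours.length : Nat) : Int) := by simp
  unfold pvSelB
  rw [PySem.List.enumerate_cons, List.filterMap_cons]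
  dsimp only
  rw [hfd, hmd, show (j : Int) + 1 = ((j + 1 : Nat) : Int) from by push_cast; ring]
  by_cases h1 : j / hours.length = d
  · cases b
    · rw [if_neg (by simp)]
      simp
    · have hbeq : (((j / hours.length : Nat) : Int) == (d : Int)) = true := by simp [h1]
      simp [hbeq, h1]
  · have hq : ¬ (((j / hours.length : Nat) : Int) = (d : Int)) := by exact_mod_cast h1
    rw [if_neg (show ¬ (j / hours.length = d ∧ b = true) from fun hc => h1 hc.1)]
    have hq2 : ¬ (((j : Int)) / ((hours.length : Nat) : Int) = (d : Int)) := by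
      rw [← Int.natCast_div]; exact hq
    simp [hq2]

-- B's single pass, from any start index and any seven-entry state
theorem pv_innerB (hours : List Int) (hH : 0 < hours.length) :
    ∀ (rest : List Bool) (j : Nat) (v : Nat → List Int),
    (PySem.List.enumerate rest (j : Int)).foldl (fun o p =>
        match PySem.Int.divmod? p.1 (hours.length : Int) with
        | none => o
        | some (day, hi) =>
          if decide (day < 7) && p.2
          then o.modify day [] (fun l => l ++ [PySem.List.pyGetD hours hi 0])
          else o) (PySem.Dict.mk (pvSeven v))
      = PySem.Dict.mk (pvSeven (fun d => v d ++ pvSelB hours d rest j)) := by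
  intro rest
  induction rest with
  | nil =>
      intro j v
      simp only [PySem.List.enumerate_nil, List.foldl_nil]
      congr 1
      exact pv_seven_congr (fun d _ => by simp [pvSelB, PySem.List.enumerate_nil])
  | cons b t ih =>
      intro j v
      rw [PySem.List.enumerate_cons]
      simp only [List.foldl_cons]
      have hne : (hours.length : Int) ≠ 0 := by exact_mod_cast hH.ne'
      have hdm : PySem.Int.divmod? (j : Int) (hours.length : Int)
          = some (((j / hours.length : Nat) : Int), ((j % hours.length : Nat) : Int)) := by
        rw [pv_divmod _ _ hne]; simp
      rw [hdm]
      dsimp only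
      have hj1 : (j : Int) + 1 = ((j + 1 : Nat) : Int) := by push_cast; ring
      by_cases hlt : j / hours.length < 7
      · cases b
        · rw [show (decide (((j / hours.length : Nat) : Int) < 7) && false) = false from by simp,
            if_neg (by simp)]
          rw [hj1, ih (j + 1) v]
          congr 1
          apply pv_seven_congr
          intro d hd
          rw [pv_selB_cons hours hH d false t j, if_neg (by simp)]
          simp
        · rw [show (decide (((j / hours.length : Nat) : Int) < 7) && true) = true from by
            simp; exact_mod_cast hlt, if_pos rfl]
          rw [pv_modify7 v _ (by positivity) (by exact_mod_cast hlt)]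
          rw [hj1, ih (j + 1) _]
          congr 1
          apply pv_seven_congr
          intro d hd
          rw [pv_selB_cons hours hH d true t j]
          by_cases hded : j / hours.length = d
          · rw [if_pos (show j / hours.length = d ∧ true = true from And.intro hded rfl),
              if_pos (show (d : Int) = ((j / hours.length : Nat) : Int) from by
                exact_mod_cast hded.symm)]
            simp
          · rw [if_neg (show ¬ (j / hours.length = d ∧ true = true) from fun hc => hded hc.1),
              if_neg (show ¬ (d : Int) = ((j / hours.length : Nat) : Int) from by
                intro hc; exact hded (by exact_mod_cast hc.symm))]
            simp
      · rw [show (decide (((j / hours.length : Nat) : Int) < 7) && b) = false from by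
          have : ¬ (((j / hours.length : Nat) : Int) < 7) := by exact_mod_cast hlt
          rw [decide_eq_false this, Bool.false_and], if_neg (by simp)]
        rw [hj1, ih (j + 1) v]
        congr 1
        apply pv_seven_congr
        intro d hd
        rw [pv_selB_cons hours hH d b t j,
          if_neg (show ¬ (j / hours.length = d ∧ b = true) from fun hc => absurd hc.1 (by omega))]
        simp

-- B's selection over a day's own chunk is the zip selection
theorem pv_mid (hours : List Int) (hH : 0 < hours.length) (dn : Nat) :
    ∀ (bs : List Bool) (r : Nat), r + bs.length ≤ hours.length →
    (PySem.List.enumerate bs ((dn * hours.length + r : Nat) : Int)).filterMap (fun p =>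
        if (PySem.Int.floordiv p.1 (hours.length : Int) == (dn : Int)) && p.2
        then some (PySem.List.pyGetD hours (PySem.Int.mod p.1 (hours.length : Int)) 0) else none)
      = ((hours.drop r).zip bs).filterMap (fun q => if q.2 then some q.1 else none) := by
  intro bs
  induction bs with
  | nil => intro r _; simp [PySem.List.enumerate_nil]
  | cons b t ih =>
      intro r hr
      have hrH : r < hours.length := by simp at hr; omega
      rw [PySem.List.enumerate_cons, List.filterMap_cons]
      have hfd : PySem.Int.floordiv (((dn * hours.length + r : Nat)) : Int) (hours.length : Int)
          = (dn : Int) := by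
        have : (dn * hours.length + r) / hours.length = dn := by
          rw [Nat.mul_comm dn hours.length, Nat.mul_add_div hH]
          simp [Nat.div_eq_of_lt hrH]
        rw [PySem.Int.floordiv_natCast, this]
      have hmd : PySem.Int.mod (((dn * hours.length + r : Nat)) : Int) (hours.length : Int)
          = (r : Int) := by
        have : (dn * hours.length + r) % hours.length = r := by
          rw [Nat.mul_comm dn hours.length, Nat.mul_add_mod]
          exact Nat.mod_eq_of_lt hrH
        rw [PySem.Int.mod_natCast, this]
      have hdropr : hours.drop r = hours[r] :: hours.drop (r + 1) := List.drop_eq_getElem_cons hrH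
      have hget : PySem.List.pyGetD hours ((r : Nat) : Int) 0 = hours[r] := by
        simp [List.getD, List.getElem?_eq_getElem hrH]
      have hnext : ((dn * hours.length + r : Nat) : Int) + 1
          = ((dn * hours.length + (r + 1) : Nat) : Int) := by push_cast; ring
      rw [hfd, hmd, hget, hnext, hdropr, List.zip_cons_cons, List.filterMap_cons]
      have ht := ih (r + 1) (by simp at hr ⊢; omega)
      cases b
      · simpa [-List.getElem_cons_drop] using ht
      · simpa [-List.getElem_cons_drop] using And.intro (rfl : hours[r] = hours[r]) ht

-- B's selection over the whole slots list equals the chunk selection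
theorem pv_window (slots : List Bool) (hours : List Int) (hH : 0 < hours.length) (dn : Nat) :
    pvSelB hours dn slots 0 = pvChunkSel slots hours dn := by
  by_cases hshort : slots.length ≤ dn * hours.length
  · have hdrop : slots.drop (dn * hours.length) = [] := List.drop_eq_nil_iff.mpr hshort
    unfold pvChunkSel pvSelB
    simp only [Nat.cast_zero]
    rw [hdrop]
    simp only [List.take_nil, List.zip_nil_right, List.filterMap_nil]
    rw [List.filterMap_eq_nil_iff.mpr ?_]
    intro p hp
    obtain ⟨k, hk, rfl⟩ := (PySem.List.mem_enumerate_iff _ _ _).mp hp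
    have hidx : ((0:Int) + (k : Nat)) = ((k : Nat) : Int) := by push_cast; ring
    have hlt : k / hours.length < dn := by
      rw [Nat.div_lt_iff_lt_mul hH]; omega
    have hfd : PySem.Int.floordiv ((k : Nat) : Int) (hours.length : Int)
        = ((k / hours.length : Nat) : Int) := by simp
    have hne : (((k / hours.length : Nat) : Int) == (dn : Int)) = false := by
      simp; omega
    simp only [hidx, hfd, hne, Bool.false_and, Bool.false_eq_true, if_false]
  · have hlong : dn * hours.length < slots.length := lt_of_not_ge hshort
    have hsplit : slots = slots.take (dn * hours.length)
        ++ ((slots.drop (dn * hours.length)).take hours.length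
            ++ (slots.drop (dn * hours.length)).drop hours.length) := by
      rw [List.take_append_drop, List.take_append_drop]
    have hlenA : (slots.take (dn * hours.length)).length = dn * hours.length := by
      simp; omega
    unfold pvSelB
    simp only [Nat.cast_zero]
    conv_lhs => rw [hsplit]
    rw [PySem.List.enumerate_append, PySem.List.enumerate_append,
      List.filterMap_append, List.filterMap_append]
    have hpart1 : ∀ (p : Int × Bool),
        p ∈ PySem.List.enumerate (slots.take (dn * hours.length)) 0 →
        (fun p =>
          if (PySem.Int.floordiv p.1 (hours.length : Int) == (dn : Int)) && p.2
          then some (PySem.List.pyGetD hours (PySem.Int.mod p.1 (hours.length : Int)) 0)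
          else none) p = none := by
      intro p hp
      obtain ⟨k, hk, rfl⟩ := (PySem.List.mem_enumerate_iff _ _ _).mp hp
      have hidx : ((0:Int) + (k : Nat)) = ((k : Nat) : Int) := by push_cast; ring
      have hlt : k / hours.length < dn := by
        rw [Nat.div_lt_iff_lt_mul hH]; omega
      have hfd : PySem.Int.floordiv ((k : Nat) : Int) (hours.length : Int)
          = ((k / hours.length : Nat) : Int) := by simp
      have hne : (((k / hours.length : Nat) : Int) == (dn : Int)) = false := by
        simp; omega
      simp only [hidx, hfd, hne, Bool.false_and, Bool.false_eq_true, if_false]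
    rw [List.filterMap_eq_nil_iff.mpr hpart1, List.nil_append]
    have hpart3 : List.filterMap (fun p =>
        if (PySem.Int.floordiv p.1 (hours.length : Int) == (dn : Int)) && p.2
        then some (PySem.List.pyGetD hours (PySem.Int.mod p.1 (hours.length : Int)) 0)
        else none)
        (PySem.List.enumerate ((slots.drop (dn * hours.length)).drop hours.length)
          ((0 : Int) + (slots.take (dn * hours.length)).length
            + ((slots.drop (dn * hours.length)).take hours.length).length)) = [] := by
      by_cases hC : (slots.drop (dn * hours.length)).drop hours.length = []
      · rw [hC]; simp [PySem.List.enumerate_nil]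
      · have hCC : dn * hours.length + hours.length < slots.length := by
          by_contra hc
          exact hC (by rw [List.drop_drop]; exact List.drop_eq_nil_iff.mpr (by omega))
        have hlenB : ((slots.drop (dn * hours.length)).take hours.length).length
            = hours.length := by simp; omega
        rw [List.filterMap_eq_nil_iff.mpr ?_]
        intro p hp
        obtain ⟨k, hk, rfl⟩ := (PySem.List.mem_enumerate_iff _ _ _).mp hp
        rw [hlenA, hlenB]
        have hidx : (0 : Int) + ((dn * hours.length : Nat) : Int) + ((hours.length : Nat) : Int)
            + (k : Int) = ((dn * hours.length + hours.length + k : Nat) : Int) := by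
          push_cast; ring
        have hge : dn < (dn * hours.length + hours.length + k) / hours.length := by
          rw [Nat.lt_div_iff_mul_lt hH]
          have := Nat.mul_le_mul_right hours.length (Nat.le_refl dn)
          omega
        have hfd := PySem.Int.floordiv_natCast (dn * hours.length + hours.length + k) hours.length
        have hne : ((((dn * hours.length + hours.length + k) / hours.length : Nat) : Int)
            == (dn : Int)) = false := by
          refine beq_eq_false_iff_ne.mpr ?_
          exact_mod_cast (by omega : (dn * hours.length + hours.length + k) / hours.length ≠ dn)
        simp only [hidx, hfd, hne, Bool.false_and, Bool.false_eq_true, if_false]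
    rw [hpart3, List.append_nil]
    have hstart : (0 : Int) + ((slots.take (dn * hours.length)).length : Int)
        = ((dn * hours.length + 0 : Nat) : Int) := by rw [hlenA]; push_cast; ring
    rw [hstart]
    have := pv_mid hours hH dn ((slots.drop (dn * hours.length)).take hours.length) 0
      (by simp)
    rw [this]
    unfold pvChunkSel
    simp

-- B's whole computation, as the 7-entry list of its per-day selections
theorem pv_B (slots : List Bool) (hours : List Int) (hH : 0 < hours.length) :
    reshape_daily_alt slots hours = pvSeven (fun dn => pvSelB hours dn slots 0) := by
  unfold reshape_daily_alt
  simp only [pv_seed]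
  rw [if_neg (show ¬ (((hours.length : Nat) : Int) == 0) = true from by
    simp; intro h; subst h; simp at hH)]
  have h := pv_innerB hours hH slots 0 (fun _ => [])
  simp only [Nat.cast_zero] at h
  rw [h]
  show pvSeven (fun d => [] ++ pvSelB hours d slots 0) = pvSeven (fun dn => pvSelB hours dn slots 0)
  exact pv_seven_congr (fun d hd => by simp)

-- the two ports agree
theorem pv_final (slots : List Bool) (hours : List Int) :
    reshape_daily slots hours = reshape_daily_alt slots hours := by
  rcases Nat.eq_zero_or_pos hours.length with h0 | hpos
  · have hnil : hours = [] := List.length_eq_zero_iff.mp h0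
    subst hnil
    rw [pv_A]
    unfold reshape_daily_alt
    rw [if_pos (by simp)]
    simp [pv_seed, pvSeven, pvSelA, pvSel, PySem.List.enumerate_nil, PySem.Dict.items]
  · rw [pv_A, pv_B slots hours hpos]
    exact pv_seven_congr (fun d hd => by rw [pv_dayA, ← pv_window slots hours hpos d])

-- ===== VERDICT (by name: the statement is the Claim_ definition above) =====
theorem reshape_daily_spec : Claim_equal_reshape_daily := by
  intro slots hours _
  unfold Spec_reshape_daily
  exact pv_final slots hours
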